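-- pv_equiv track=rewrite | github.com/piif/AdventOfCode2023 | 2025/10_buttons/a.py | conv1
-- ===== SOURCE A (Python) =====
-- def conv1(input):
--     value_len = len(input)
--     value = 0
--     for c in input:
--         value <<= 1
--         if c == '#':
--             value += 1
--     return value, value_len
-- ===== SOURCE B (Python) =====
-- def conv1(input):
--     value = sum(2 ** (len(input) - 1 - i) for i, c in enumerate(input) if c == '#')
--     return value, len(input)
-- ===== Notes on version B (the rewrite author's own statement) =====
-- stated objective: idiomatic
-- what changed: Replaces the running accumulator shifted left each step with a positional-weight sum adding each set bit's place value 2**(len-1-i).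
import Mathlib
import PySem

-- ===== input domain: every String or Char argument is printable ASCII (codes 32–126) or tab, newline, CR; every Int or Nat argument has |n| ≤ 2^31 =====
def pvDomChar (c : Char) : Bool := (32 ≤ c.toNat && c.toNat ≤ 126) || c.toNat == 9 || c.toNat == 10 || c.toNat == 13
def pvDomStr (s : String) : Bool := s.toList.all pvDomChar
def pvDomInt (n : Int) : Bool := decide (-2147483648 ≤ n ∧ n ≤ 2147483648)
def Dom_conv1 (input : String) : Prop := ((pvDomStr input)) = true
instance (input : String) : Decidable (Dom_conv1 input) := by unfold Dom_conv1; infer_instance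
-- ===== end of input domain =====

-- ===== PORT A =====
-- literal transliteration: value_len = len(input); value accumulated left-shift-then-conditionally-add over the chars
def conv1 (input : String) : Int × Int :=
  let value_len : Int := PySem.Str.len input
  let value : Int :=
    input.toList.foldl (fun v c => let v := 2 * v; if c = '#' then v + 1 else v) 0
  (value, value_len)

-- ===== PORT B =====
-- transliteration of Source B: positional-weight sum over enumerate(input); the exponent len-1-i is
-- nonnegative for every produced index i, so .toNat on it is exact here
def conv1_alt (input : String) : Int × Int :=
  let n : Int := PySem.Str.len input
  let value : Int :=
    (PySem.List.enumerate input.toList 0).foldl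
      (fun s p => if p.2 = '#' then s + (2 : Int) ^ (n - 1 - p.1).toNat else s) 0
  (value, n)

-- ===== PRECONDITION & SPEC =====
def Spec_conv1 (input : String) (out : Int × Int) : Prop := out = conv1_alt input
instance (input : String) (out : Int × Int) : Decidable (Spec_conv1 input out) := by unfold Spec_conv1; infer_instance

-- ===== CLAIM (what is proved, stated in full; the proofs are below) =====
def Claim_equal_conv1 : Prop := ∀ (input : String), Dom_conv1 input → Spec_conv1 input (conv1 input)

-- ===== LEMMAS AND PROOFS =====

-- ===== VERDICT (by name: the statement is the Claim_ definition above) =====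
-- binary value of a char list, defined positionally from the front
def pvVal : List Char → Int
  | [] => 0
  | c :: t => (if c = '#' then 1 else 0) * 2 ^ t.length + pvVal t

theorem pvA_foldl (cs : List Char) (a : Int) :
    cs.foldl (fun v c => let v := 2 * v; if c = '#' then v + 1 else v) a
      = a * 2 ^ cs.length + pvVal cs := by
  induction cs generalizing a with
  | nil => simp [pvVal]
  | cons c t ih =>
    simp only [List.foldl_cons, ih, pvVal, List.length_cons]
    split_ifs <;> ring

theorem pvB_foldl (cs : List Char) (s : Int) (n : Int) (a : Int)
    (hn : n = s + cs.length) :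
    (PySem.List.enumerate cs s).foldl
        (fun a p => if p.2 = '#' then a + (2 : Int) ^ (n - 1 - p.1).toNat else a) a
      = a + pvVal cs := by
  induction cs generalizing s a with
  | nil => simp [pvVal, PySem.List.enumerate_nil]
  | cons c t ih =>
    rw [PySem.List.enumerate_cons]
    simp only [List.foldl_cons]
    rw [ih (s + 1) _ (by simp at hn ⊢; omega)]
    have he : (n - 1 - s).toNat = t.length := by
      simp at hn; omega
    simp only [pvVal, he]
    split_ifs <;> ring

theorem conv1_spec : Claim_equal_conv1 := by
  intro input _
  unfold Spec_conv1 conv1 conv1_alt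
  dsimp only
  rw [pvA_foldl,
    pvB_foldl input.toList 0 (PySem.Str.len input) 0 (by simp [PySem.Str.len])]
  simp
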